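-- pv_equiv track=rewrite | github.com/akash-sharma11/DubData-Remover | csv_duplicate_checker_streamlit_download.py | select_phone_column_auto
-- ===== SOURCE A (Python) =====
-- def select_phone_column_auto(columns: list) -> str:
--     """Auto-select a phone-like column name if present in columns list."""
--     lowered = [c.lower() for c in columns]
--     priority = ["phone", "mobile", "contact", "telephone", "tel", "mob"]
--     for p in priority:
--         for i, c in enumerate(lowered):
--             if p in c:
--                 return columns[i]
--     # fallback: return first column that looks numeric-ish in name
--     for i, c in enumerate(lowered):
--         if any(k in c for k in ["number", "no.", "num"]):
--             return columns[i]
--     return None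
-- ===== SOURCE B (Python) =====
-- _KEYWORDS = ["phone", "mobile", "contact", "telephone", "tel", "mob"]
-- _FALLBACK = ["number", "no.", "num"]
--
--
-- def select_phone_column_auto(columns: list) -> str:
--     """Auto-select a phone-like column name if present in columns list."""
--     best = None  # (rank, index) of the best-ranked column seen so far
--     for i, col in enumerate(columns):
--         lc = col.lower()
--         rank = next((r for r, k in enumerate(_KEYWORDS) if k in lc), None)
--         if rank is None and any(k in lc for k in _FALLBACK):
--             rank = len(_KEYWORDS)
--         if rank is not None and (best is None or rank < best[0]):
--             best = (rank, i)
--     return columns[best[1]] if best is not None else None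
-- ===== Notes on version B (the rewrite author's own statement) =====
-- stated objective: alternative
-- what changed: A does keyword-major repeated scans over the columns (one pass per priority keyword, then a fallback pass); B makes a single column-major pass, computing each column's keyword rank once and keeping the running minimum (rank, index).
import Mathlib
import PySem

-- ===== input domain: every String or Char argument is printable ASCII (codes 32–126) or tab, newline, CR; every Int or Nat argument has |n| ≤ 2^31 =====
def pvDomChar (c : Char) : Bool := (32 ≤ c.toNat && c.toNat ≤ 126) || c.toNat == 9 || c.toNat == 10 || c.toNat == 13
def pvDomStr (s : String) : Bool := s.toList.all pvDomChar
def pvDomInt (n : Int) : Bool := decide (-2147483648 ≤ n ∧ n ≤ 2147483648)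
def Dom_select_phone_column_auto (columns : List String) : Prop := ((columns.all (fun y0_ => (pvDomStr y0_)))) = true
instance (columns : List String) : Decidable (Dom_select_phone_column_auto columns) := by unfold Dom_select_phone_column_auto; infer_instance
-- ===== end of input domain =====

-- B replaces A's keyword-major repeated scans by one column-major pass that keeps the
-- best (rank, index) seen so far; objective: alternative decomposition (same cost class).


-- ===== PORT A =====
def pvPriorityA : List String := ["phone", "mobile", "contact", "telephone", "tel", "mob"]

-- inner loop: `for i, c in enumerate(lowered): if p in c: return columns[i]`
def pvAInner (columns : List String) (p : String) : List (Int × String) → Option String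
  | [] => none
  | (i, c) :: rest =>
    if PySem.Str.isIn p c then PySem.List.pyGet? columns i else pvAInner columns p rest

-- outer loop: `for p in priority: …`
def pvAPriority (columns : List String) (en : List (Int × String)) : List String → Option String
  | [] => none
  | p :: ps =>
    match pvAInner columns p en with
    | some v => some v
    | none => pvAPriority columns en ps

-- fallback loop: `for i, c in enumerate(lowered): if any(k in c for k in [...]): return columns[i]`
def pvAFallback (columns : List String) : List (Int × String) → Option String
  | [] => none
  | (i, c) :: rest =>
    if PySem.Str.isIn "number" c || PySem.Str.isIn "no." c || PySem.Str.isIn "num" c then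
      PySem.List.pyGet? columns i
    else pvAFallback columns rest

def select_phone_column_auto (columns : List String) : Option String :=
  let lowered := columns.map PySem.Str.lower
  let en := PySem.List.enumerate lowered
  match pvAPriority columns en pvPriorityA with
  | some v => some v
  | none => pvAFallback columns en

-- ===== PORT B =====
def pvKeywordsB : List String := ["phone", "mobile", "contact", "telephone", "tel", "mob"]
def pvFallbackB : List String := ["number", "no.", "num"]

-- `next((r for r, k in enumerate(_KEYWORDS) if k in lc), None)`
def pvRankFirst (lc : String) : List String → Nat → Option Nat
  | [], _ => none
  | k :: ks, r => if PySem.Str.isIn k lc then some r else pvRankFirst lc ks (r + 1)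

def pvRankB (lc : String) : Option Nat :=
  match pvRankFirst lc pvKeywordsB 0 with
  | some r => some r
  | none =>
    if pvFallbackB.any (fun k => PySem.Str.isIn k lc) then some pvKeywordsB.length else none

-- `for i, col in enumerate(columns): … if rank is not None and (best is None or rank < best[0]): best = (rank, i)`
def pvBLoop (best : Option (Nat × Nat)) (i : Nat) : List String → Option (Nat × Nat)
  | [] => best
  | c :: rest =>
    let rank := pvRankB (PySem.Str.lower c)
    let best' : Option (Nat × Nat) :=
      match rank, best with
      | none, b => b
      | some r, none => some (r, i)
      | some r, some (br, bi) => if r < br then some (r, i) else some (br, bi)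
    pvBLoop best' (i + 1) rest

def select_phone_column_auto_alt (columns : List String) : Option String :=
  match pvBLoop none 0 columns with
  | some (_, bi) => PySem.List.pyGet? columns (bi : Int)
  | none => none

-- ===== PRECONDITION & SPEC =====
def Spec_select_phone_column_auto (columns : List String) (out : Option String) : Prop := out = select_phone_column_auto_alt columns
instance (columns : List String) (out : Option String) : Decidable (Spec_select_phone_column_auto columns out) := by unfold Spec_select_phone_column_auto; infer_instance

-- ===== CLAIM (what is proved, stated in full; the proofs are below) =====
def Claim_equal_select_phone_column_auto : Prop := ∀ (columns : List String), Dom_select_phone_column_auto columns → Spec_select_phone_column_auto columns (select_phone_column_auto columns)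

-- ===== LEMMAS AND PROOFS =====

-- leftmost minimum of a list of optional ranks, with absolute start index
def pvSpecBest (s : Nat) : List (Option Nat) → Option (Nat × Nat)
  | [] => none
  | none :: rs => pvSpecBest (s + 1) rs
  | some r :: rs =>
    match pvSpecBest (s + 1) rs with
    | none => some (r, s)
    | some (r', i') => if r' < r then some (r', i') else some (r, s)

def pvMerge : Option (Nat × Nat) → Option (Nat × Nat) → Option (Nat × Nat)
  | b, none => b
  | none, some x => some x
  | some (br, bi), some (r, i) => if r < br then some (r, i) else some (br, bi)

@[simp] lemma pvMerge_none_right (b : Option (Nat × Nat)) : pvMerge b none = b := by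
  rcases b with _ | ⟨br, bi⟩ <;> rfl

@[simp] lemma pvMerge_none_left (x : Option (Nat × Nat)) : pvMerge none x = x := by
  rcases x with _ | ⟨r, i⟩ <;> rfl

lemma pvMerge_some_some (br bi r i : Nat) :
    pvMerge (some (br, bi)) (some (r, i)) = if r < br then some (r, i) else some (br, bi) := rfl

@[simp] lemma pvSpecBest_nil (s : Nat) : pvSpecBest s [] = none := rfl

lemma pvMerge_assoc (a b c : Option (Nat × Nat)) :
    pvMerge (pvMerge a b) c = pvMerge a (pvMerge b c) := by
  rcases a with _ | ⟨ar, ai⟩ <;> rcases b with _ | ⟨br, bi⟩ <;> rcases c with _ | ⟨cr, ci⟩ <;>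
    simp only [pvMerge_none_right, pvMerge_none_left, pvMerge_some_some] <;>
    split_ifs <;> first | rfl | (exfalso; omega) | (simp only [pvMerge_some_some]; split_ifs <;> first | rfl | (exfalso; omega))

lemma pvSpecBest_cons (s : Nat) (o : Option Nat) (rs : List (Option Nat)) :
    pvSpecBest s (o :: rs) =
      pvMerge (o.map (fun r => (r, s))) (pvSpecBest (s + 1) rs) := by
  rcases o with _ | r
  · simp only [pvSpecBest, Option.map_none, pvMerge_none_left]
  · simp only [pvSpecBest, Option.map_some]
    rcases hS : pvSpecBest (s + 1) rs with _ | ⟨r', i'⟩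
    · rfl
    · rfl

lemma pvBLoop_eq (cs : List String) : ∀ (best : Option (Nat × Nat)) (i : Nat),
    pvBLoop best i cs =
      pvMerge best (pvSpecBest i (cs.map (fun c => pvRankB (PySem.Str.lower c)))) := by
  induction cs with
  | nil => intro best i; simp [pvBLoop, pvMerge]
  | cons c rest ih =>
    intro best i
    rw [List.map_cons, pvSpecBest_cons, ← pvMerge_assoc]
    show pvBLoop _ (i + 1) rest = _
    rw [ih]
    congr 1
    rcases h : pvRankB (PySem.Str.lower c) with _ | r
    · rcases best with _ | ⟨br, bi⟩ <;> simp [pvMerge]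
    · rcases best with _ | ⟨br, bi⟩ <;> simp [pvMerge]

-- every element pvSpecBest returns comes from the list
lemma pvSpecBest_mem (rs : List (Option Nat)) : ∀ (s r i : Nat),
    pvSpecBest s rs = some (r, i) → ∃ k, ∃ _ : k < rs.length, rs[k] = some r ∧ i = s + k := by
  induction rs with
  | nil => intro s r i h; simp at h
  | cons o rs' ih =>
    intro s r i h
    rcases o with _ | r0
    · obtain ⟨k, hk, hget, hi⟩ := ih (s + 1) r i h
      exact ⟨k + 1, by simpa using hk, by simpa using hget, by omega⟩
    · simp only [pvSpecBest] at h
      rcases hS : pvSpecBest (s + 1) rs' with _ | ⟨r', i'⟩ <;> rw [hS] at h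
      · have h' : some (r0, s) = some (r, i) := h
        simp only [Option.some.injEq, Prod.mk.injEq] at h'
        exact ⟨0, by simp, by simp [h'.1], by omega⟩
      · have h' : (if r' < r0 then some (r', i') else some (r0, s)) = some (r, i) := h
        split_ifs at h' with hlt
        · obtain ⟨k, hk, hget, hi⟩ := ih (s + 1) r i (by rw [hS, h'])
          exact ⟨k + 1, by simpa using hk, by simpa using hget, by omega⟩
        · simp only [Option.some.injEq, Prod.mk.injEq] at h'
          exact ⟨0, by simp, by simp [h'.1], by omega⟩

-- leftmost minimum characterisation
lemma pvSpecBest_eq_of_min (rs : List (Option Nat)) : ∀ (s j t : Nat) (hj : j < rs.length),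
    rs[j] = some t →
    (∀ i r, ∀ _ : i < rs.length, rs[i] = some r → t ≤ r) →
    (∀ i, ∀ _ : i < j, rs[i]'(by omega) ≠ some t) →
    pvSpecBest s rs = some (t, s + j) := by
  induction rs with
  | nil => intro s j t hj; simp at hj
  | cons o rs' ih =>
    intro s j t hj hget hmin hfirst
    rcases j with _ | j'
    · simp at hget; subst hget
      rw [pvSpecBest_cons]
      rcases hS : pvSpecBest (s + 1) rs' with _ | ⟨r', i'⟩
      · simp [pvMerge]
      · obtain ⟨k, hk, hk2, _⟩ := pvSpecBest_mem rs' (s + 1) r' i' hS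
        have : t ≤ r' := hmin (k + 1) r' (by simpa using hk) (by simpa using hk2)
        simp [pvMerge, Nat.not_lt.mpr this]
    · have h0 : o ≠ some t := by simpa using hfirst 0 (by omega)
      have hrec : pvSpecBest (s + 1) rs' = some (t, (s + 1) + j') := by
        refine ih (s + 1) j' t (by simpa using hj) (by simpa using hget)
          (fun i r hi hr => hmin (i + 1) r (by simpa using hi) (by simpa using hr))
          (fun i hi => by simpa using hfirst (i + 1) (by omega))
      rw [pvSpecBest_cons, hrec]
      rcases o with _ | r0
      · simp [pvMerge]; omega
      · have ht : t ≤ r0 := hmin 0 r0 (by simp) (by simp)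
        have : t < r0 := lt_of_le_of_ne ht (by simpa [eq_comm] using h0)
        simp [pvMerge, this]; omega

-- uniform-rank lists: pvSpecBest is the first index satisfying the predicate
lemma pvSpecBest_uniform (f : String → Option Nat) (p : String → Bool) (v : Nat)
    (hf : ∀ c, f c = if p c then some v else none) (cs : List String) : ∀ (s : Nat),
    (pvSpecBest s (cs.map f)).map (·.2) = (List.findIdx? p cs).map (fun j => s + j) := by
  induction cs with
  | nil => intro s; simp
  | cons c cs' ih =>
    intro s
    rw [List.map_cons, pvSpecBest_cons, List.findIdx?_cons, hf c]
    by_cases hp : p c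
    · simp only [hp, if_pos]
      rcases hS : pvSpecBest (s + 1) (cs'.map f) with _ | ⟨r', i'⟩
      · simp [pvMerge]
      · obtain ⟨k, hk, hk2, _⟩ := pvSpecBest_mem _ (s + 1) r' i' hS
        rw [List.length_map] at hk
        have hfk : f cs'[k] = some r' := by
          rw [← hk2]; simp
        have hr' : r' = v := by
          rw [hf] at hfk; split_ifs at hfk <;> simp_all
        subst hr'
        simp [pvMerge_some_some]
    · simp only [hp, if_neg, Bool.false_eq_true, not_false_iff,
        Option.map_none, pvMerge_none_left, ih (s + 1)]
      rcases List.findIdx? p cs' with _ | j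
      · simp
      · simp only [Option.map_some, Option.some.injEq]
        omega

-- ===== A-side characterisations =====

lemma pvAInner_eq (columns : List String) (p : String) (cs : List String) : ∀ (s : Int),
    pvAInner columns p (PySem.List.enumerate cs s) =
      match List.findIdx? (fun c => PySem.Str.isIn p c) cs with
      | some j => PySem.List.pyGet? columns (s + j)
      | none => none := by
  induction cs with
  | nil => intro s; simp [pvAInner, PySem.List.enumerate]
  | cons c cs' ih =>
    intro s
    rw [PySem.List.enumerate_cons, List.findIdx?_cons]
    by_cases h : PySem.Str.isIn p c
    · have h' : PySem.Chars.isIn p.toList c.toList = true := by simpa using h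
      simp [pvAInner, h']
    · simp only [pvAInner, h, Bool.false_eq_true, if_false, ih (s + 1)]
      rcases List.findIdx? (fun c => PySem.Str.isIn p c) cs' with _ | j
      · simp
      · simp; congr 1; ring

def pvFirstHit (cs : List String) : List String → Option Nat
  | [] => none
  | k :: ks =>
    match List.findIdx? (fun c => PySem.Str.isIn k c) cs with
    | some j => some j
    | none => pvFirstHit cs ks

lemma pvFirstHit_lt (cs : List String) (ks : List String) (j : Nat)
    (h : pvFirstHit cs ks = some j) : j < cs.length := by
  induction ks with
  | nil => simp [pvFirstHit] at h
  | cons k ks' ih =>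
    simp only [pvFirstHit] at h
    rcases hfi : List.findIdx? (fun c => PySem.Str.isIn k c) cs with _ | j' <;> rw [hfi] at h
    · exact ih h
    · cases h
      exact (List.findIdx?_eq_some_iff_findIdx_eq.mp hfi).1

lemma pvAPriority_eq (columns cs : List String) (hlen : cs.length ≤ columns.length)
    (ks : List String) :
    pvAPriority columns (PySem.List.enumerate cs) ks =
      match pvFirstHit cs ks with
      | some j => PySem.List.pyGet? columns (j : Int)
      | none => none := by
  induction ks with
  | nil => simp [pvAPriority, pvFirstHit]
  | cons k ks' ih =>
    simp only [pvAPriority, pvFirstHit]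
    rw [pvAInner_eq columns k cs 0]
    rcases hfi : List.findIdx? (fun c => PySem.Str.isIn k c) cs with _ | j
    · simpa using ih
    · have hj : j < columns.length :=
        lt_of_lt_of_le (List.findIdx?_eq_some_iff_findIdx_eq.mp hfi).1 hlen
      simp [List.getElem?_eq_getElem hj]

def pvFbP (c : String) : Bool :=
  PySem.Str.isIn "number" c || PySem.Str.isIn "no." c || PySem.Str.isIn "num" c

lemma pvAFallback_eq (columns : List String) (cs : List String) : ∀ (s : Int),
    pvAFallback columns (PySem.List.enumerate cs s) =
      match List.findIdx? pvFbP cs with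
      | some j => PySem.List.pyGet? columns (s + j)
      | none => none := by
  induction cs with
  | nil => intro s; simp [pvAFallback, PySem.List.enumerate]
  | cons c cs' ih =>
    intro s
    rw [PySem.List.enumerate_cons, List.findIdx?_cons]
    by_cases h : pvFbP c
    · have h3 : (PySem.Str.isIn "number" c || PySem.Str.isIn "no." c || PySem.Str.isIn "num" c) = true := h
      simp only [pvAFallback, h3, if_true]
      simp [h]
    · have h3 : (PySem.Chars.isIn "number".toList c.toList || PySem.Chars.isIn "no.".toList c.toList
          || PySem.Chars.isIn "num".toList c.toList) = false := by simpa [pvFbP] using h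
      simp only [pvAFallback, PySem.Str.isIn_eq, h3, Bool.false_eq_true, if_false, ih (s + 1), h]
      rcases List.findIdx? pvFbP cs' with _ | j
      · simp
      · simp; congr 1; ring

-- rank computed from a suffix of the keyword list starting at offset t
def pvRankSuffix (c : String) (ks : List String) (t : Nat) : Option Nat :=
  match pvRankFirst c ks t with
  | some r => some r
  | none => if pvFallbackB.any (fun k => PySem.Str.isIn k c) then some 6 else none

lemma pvRankFirst_cons (c k : String) (ks : List String) (t : Nat) :
    pvRankFirst c (k :: ks) t = if PySem.Str.isIn k c then some t else pvRankFirst c ks (t + 1) := rfl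

lemma pvRankSuffix_cons_neg (c k : String) (ks : List String) (t : Nat)
    (h : PySem.Str.isIn k c = false) :
    pvRankSuffix c (k :: ks) t = pvRankSuffix c ks (t + 1) := by
  unfold pvRankSuffix
  rw [pvRankFirst_cons, h]
  simp

lemma pvRankSuffix_cons_pos (c k : String) (ks : List String) (t : Nat)
    (h : PySem.Str.isIn k c = true) :
    pvRankSuffix c (k :: ks) t = some t := by
  unfold pvRankSuffix
  rw [pvRankFirst_cons, h]
  simp

lemma pvRankFirst_ge (c : String) (ks : List String) : ∀ t r, pvRankFirst c ks t = some r → t ≤ r := by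
  induction ks with
  | nil => intro t r h; simp [pvRankFirst] at h
  | cons k ks' ih =>
    intro t r h
    simp only [pvRankFirst] at h
    split_ifs at h
    · cases h; omega
    · have := ih (t + 1) r h; omega

lemma pvRankSuffix_ge (c : String) (ks : List String) (t r : Nat) (ht : t ≤ 6)
    (h : pvRankSuffix c ks t = some r) : t ≤ r := by
  unfold pvRankSuffix at h
  rcases hf : pvRankFirst c ks t with _ | r0 <;> rw [hf] at h
  · split_ifs at h <;> simp_all
  · cases h; exact pvRankFirst_ge c ks t r hf

-- the semantic core: A's keyword-major search equals the leftmost-minimal-rank column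
lemma pvCore (cs : List String) : ∀ (ks : List String) (t : Nat),
    t + ks.length = 6 →
    (∀ c ∈ cs, pvRankB c = pvRankSuffix c ks t) →
    (match pvFirstHit cs ks with
     | some j => some j
     | none => List.findIdx? pvFbP cs) =
      (pvSpecBest 0 (cs.map pvRankB)).map (·.2) := by
  intro ks
  induction ks with
  | nil =>
    intro t ht H
    have hfb : ∀ c ∈ cs, pvRankB c = if pvFbP c then some 6 else none := by
      intro c hc
      rw [H c hc]
      unfold pvRankSuffix pvRankFirst
      simp [pvFallbackB, pvFbP, Bool.or_assoc]
    simp only [pvFirstHit]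
    -- rewrite the map using the membership-pointwise description, then use the uniform lemma
    have hmap : cs.map pvRankB = cs.map (fun c => if pvFbP c then some 6 else none) :=
      List.map_congr_left hfb
    rw [hmap, pvSpecBest_uniform (fun c => if pvFbP c then some 6 else none) pvFbP 6 (fun c => rfl) cs 0]
    rcases List.findIdx? pvFbP cs with _ | j <;> simp
  | cons k ks' ih =>
    intro t ht H
    rcases hfi : List.findIdx? (fun c => PySem.Str.isIn k c) cs with _ | j
    · -- no column contains k: drop k and recurse
      have hnone : ∀ c ∈ cs, ¬ PySem.Str.isIn k c := by
        simpa using List.findIdx?_eq_none_iff.mp hfi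
      have H' : ∀ c ∈ cs, pvRankB c = pvRankSuffix c ks' (t + 1) := by
        intro c hc
        rw [H c hc]
        exact pvRankSuffix_cons_neg c k ks' t
          (by simp only [Bool.not_eq_true] at hnone; exact hnone c hc)
      have hred : pvFirstHit cs (k :: ks') = pvFirstHit cs ks' := by
        simp only [pvFirstHit, hfi]
      rw [hred]
      exact ih (t + 1) (by simp at ht ⊢; omega) H'
    · -- k is found: the minimal rank is t, first at index j
      simp only [pvFirstHit, hfi]
      have ht5 : t ≤ 5 := by simp at ht; omega
      rw [List.findIdx?_eq_some_iff_getElem] at hfi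
      obtain ⟨hj, hpj, hfirst⟩ := hfi
      -- rank = some t ↔ the column contains k   (for columns of cs)
      have hiff : ∀ c ∈ cs, (pvRankB c = some t ↔ PySem.Str.isIn k c = true) := by
        intro c hc
        rw [H c hc]
        constructor
        · intro hr
          by_contra hni
          rw [Bool.not_eq_true] at hni
          rw [pvRankSuffix_cons_neg c k ks' t hni] at hr
          have := pvRankSuffix_ge c ks' (t + 1) t (by omega) hr
          omega
        · intro hi
          exact pvRankSuffix_cons_pos c k ks' t hi
      have hmem : ∀ i, ∀ _ : i < cs.length, cs[i] ∈ cs := fun i hi => List.getElem_mem hi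
      have hlow : ∀ c ∈ cs, ∀ r, pvRankB c = some r → t ≤ r := by
        intro c hc r hr
        rw [H c hc] at hr
        exact pvRankSuffix_ge c (k :: ks') t r (by omega) hr
      have hjm : j < (cs.map pvRankB).length := by rwa [List.length_map]
      have hspec : pvSpecBest 0 (cs.map pvRankB) = some (t, 0 + j) := by
        refine pvSpecBest_eq_of_min (cs.map pvRankB) 0 j t hjm ?_ ?_ ?_
        · rw [List.getElem_map]
          exact (hiff cs[j] (hmem j hj)).mpr hpj
        · intro i r hi hr
          rw [List.length_map] at hi
          rw [List.getElem_map] at hr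
          exact hlow cs[i] (hmem i hi) r hr
        · intro i hi
          rw [List.getElem_map]
          intro hcon
          have hni : ¬ PySem.Str.isIn k (cs[i]'(by omega)) = true := by simpa using hfirst i hi
          exact hni ((hiff _ (hmem i (by omega))).mp hcon)
      rw [hspec]; simp

-- ===== VERDICT (by name: the statement is the Claim_ definition above) =====
theorem select_phone_column_auto_spec : Claim_equal_select_phone_column_auto := by
  intro columns _
  unfold Spec_select_phone_column_auto
  have hA : select_phone_column_auto columns =
      match pvAPriority columns (PySem.List.enumerate (columns.map PySem.Str.lower)) pvPriorityA with
      | some v => some v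
      | none => pvAFallback columns (PySem.List.enumerate (columns.map PySem.Str.lower)) := rfl
  have hB : select_phone_column_auto_alt columns =
      match pvBLoop none 0 columns with
      | some (_, bi) => PySem.List.pyGet? columns (bi : Int)
      | none => none := rfl
  have hmm : (columns.map PySem.Str.lower).map pvRankB
      = columns.map (fun c => pvRankB (PySem.Str.lower c)) := by
    rw [List.map_map]; rfl
  have ht6 : (0 : Nat) + pvPriorityA.length = 6 := by simp [pvPriorityA]
  have hH : ∀ c ∈ columns.map PySem.Str.lower, pvRankB c = pvRankSuffix c pvPriorityA 0 := by
    intro c _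
    unfold pvRankB pvRankSuffix pvKeywordsB pvPriorityA pvFallbackB
    rfl
  have hcore := pvCore (columns.map PySem.Str.lower) pvPriorityA 0 ht6 hH
  rw [hmm] at hcore
  rw [hA, hB, pvBLoop_eq, pvMerge_none_left,
    pvAPriority_eq columns (columns.map PySem.Str.lower) (by simp) pvPriorityA,
    pvAFallback_eq columns (columns.map PySem.Str.lower) 0]
  rcases hF : pvFirstHit (columns.map PySem.Str.lower) pvPriorityA with _ | j <;>
    rw [hF] at hcore
  · rcases hFb : List.findIdx? pvFbP (columns.map PySem.Str.lower) with _ | j' <;>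
      rw [hFb] at hcore <;>
      rcases hS : pvSpecBest 0 (columns.map fun c => pvRankB (PySem.Str.lower c)) with _ | ⟨r, bi⟩ <;>
      rw [hS] at hcore <;> simp_all
  · -- a priority keyword matched, first at index j
    have hjlt : j < columns.length := by
      have := pvFirstHit_lt (columns.map PySem.Str.lower) pvPriorityA j hF
      simpa using this
    rcases hS : pvSpecBest 0 (columns.map fun c => pvRankB (PySem.Str.lower c)) with _ | ⟨r, bi⟩ <;>
      rw [hS] at hcore <;> simp_all
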